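-- pv_equiv track=rewrite | github.com/svHatch/mustats | uscores.py | uscore
-- ===== SOURCE A (Python) =====
-- def uscore(data):
--     """Calcultates the uscore of either a single value (univariate), or multiple values (multivariate).
--
--     data - A list of rows
--     """
--     res = []
--     for row in data:
--         scores = [] # Init empty scores list
--         for row2 in data:
--             scores.append(indicator(row, row2))
--
--         res.append(sum(scores))
--
--     return res
--
-- def indicator(datum1, datum2):
--     """Returns 1 for superiority. Returns 0 if it can't be ordered, or if it is inferior"""
--     if test_superiority(datum2, datum1):
--         return 1
--     elif test_superiority(datum1, datum2):
--         return -1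
--     else:
--         return 0 # Cannot be ordered
--
-- def test_superiority(datum1, datum2):
--     """Returns True if it is superior, returns False if it is inferior. Comparison is always "Is the second value superior to the 1st?"""
--     # Test to see if they are equal
--     if datum2 == datum1:
--         return False # Identical pairs can't be superior/inferior
--
--     # Run through each variable
--     gt_cnt = 0
--     for i in range(len(datum2)):
--         if datum2[i] < datum1[i]:
--             return False
--         else: # It's greater than or equal
--             if datum2[i] > datum1[i]:
--                 gt_cnt += 1
--
--     # If any variables are greater than, it is superior
--     if gt_cnt > 0:
--         return True
-- ===== SOURCE B (Python) =====
-- def cmp_rows(x, y):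
--     """Pareto comparison: 1 if x dominates y, -1 if y dominates x, else 0 (one componentwise scan)."""
--     ge = True
--     le = True
--     for a, b in zip(x, y):
--         if a < b:
--             ge = False
--         elif a > b:
--             le = False
--         if not ge and not le:
--             return 0
--     if ge and not le:
--         return 1
--     if le and not ge:
--         return -1
--     return 0
--
--
-- def uscore(data):
--     """Each unordered pair is compared once (back-to-front sweep); the antisymmetric
--     comparison is added to one row's score and subtracted from the other's."""
--     res = []
--     tail = []
--     for row in reversed(data):
--         total = 0
--         updated = []
--         for s, trow in zip(res, tail):
--             c = cmp_rows(row, trow)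
--             total += c
--             updated.append(s - c)
--         res = [total] + updated
--         tail = [row] + tail
--     return res
-- ===== Notes on version B (the rewrite author's own statement) =====
-- stated objective: faster
-- what changed: Instead of comparing every ordered pair with up to two full superiority scans, B sweeps the rows back-to-front comparing each unordered pair exactly once with a single componentwise scan, adding the antisymmetric comparison to one row's score and subtracting it from the other's.
-- outside the precondition, e.g. on uscore([[5], [1, 2]]): A returns [1, -1], B returns [1, -1]
import Mathlib
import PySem

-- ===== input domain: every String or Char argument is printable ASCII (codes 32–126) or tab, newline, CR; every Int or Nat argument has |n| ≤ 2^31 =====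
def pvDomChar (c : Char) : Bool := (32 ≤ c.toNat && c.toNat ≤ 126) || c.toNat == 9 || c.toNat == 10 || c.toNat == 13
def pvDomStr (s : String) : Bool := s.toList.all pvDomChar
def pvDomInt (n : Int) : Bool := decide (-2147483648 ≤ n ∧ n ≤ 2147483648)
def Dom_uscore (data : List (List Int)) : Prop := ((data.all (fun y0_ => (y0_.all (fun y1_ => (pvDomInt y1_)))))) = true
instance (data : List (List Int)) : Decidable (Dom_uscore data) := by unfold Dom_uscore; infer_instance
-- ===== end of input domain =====

-- B compares each unordered pair once with a single componentwise Pareto scan (a back-to-front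
-- sweep using antisymmetry of the comparison) instead of A's up-to-two full superiority scans
-- per ordered pair: a measured constant-factor speed-up.

-- ===== PORT A =====
-- the 'for i in range(len(datum2))' loop of test_superiority, with its two early returns
def testSupLoop (datum1 datum2 : List Int) (i : Nat) (gtCnt : Int) : Bool :=
  if h : i < datum2.length then
    match PySem.List.pyGet? datum1 (i : Int) with
    | none => false   -- Python raises IndexError here; such ragged inputs are outside Pre_uscore
    | some a =>
      if datum2[i] < a then false
      else testSupLoop datum1 datum2 (i + 1) (if a < datum2[i] then gtCnt + 1 else gtCnt)
  else decide (gtCnt > 0)   -- 'return True' if gt_cnt > 0, else falls off (None, falsy)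
termination_by datum2.length - i

def testSup (datum1 datum2 : List Int) : Bool :=
  if datum2 == datum1 then false
  else testSupLoop datum1 datum2 0 0

def indicatorA (datum1 datum2 : List Int) : Int :=
  if testSup datum2 datum1 then 1
  else if testSup datum1 datum2 then -1
  else 0

def uscore (data : List (List Int)) : List Int :=
  data.foldl (fun res row =>
    res ++ [(data.foldl (fun scores row2 => scores ++ [indicatorA row row2]) []).sum]) []

-- ===== PORT B =====
-- the 'for a, b in zip(x, y)' loop of cmp_rows; 'none' is the early 'return 0'
def cmpRowsLoop : List (Int × Int) → Bool → Bool → Option (Bool × Bool)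
  | [], ge, le => some (ge, le)
  | ab :: l, ge, le =>
    let ge' := if ab.1 < ab.2 then false else ge
    let le' := if ab.1 < ab.2 then le else if ab.2 < ab.1 then false else le
    if !ge' && !le' then none
    else cmpRowsLoop l ge' le'

def cmpRows (x y : List Int) : Int :=
  match cmpRowsLoop (x.zip y) true true with
  | none => 0
  | some p => if p.1 && !p.2 then 1 else if p.2 && !p.1 then -1 else 0

def uscore_alt (data : List (List Int)) : List Int :=
  (data.reverse.foldl (fun (st : List Int × List (List Int)) row =>
    let z := (st.1.zip st.2).foldl (fun (acc : Int × List Int) p =>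
      let c := cmpRows row p.2
      (acc.1 + c, acc.2 ++ [p.1 - c])) (0, ([] : List Int))
    (z.1 :: z.2, row :: st.2)) (([] : List Int), ([] : List (List Int)))).1

-- ===== PRECONDITION & SPEC =====
-- Pre_ excludes ragged inputs (rows of unequal length): on those A's index loop can raise
-- IndexError (e.g. [[1],[1,2]]), and where it happens to return early the value is an
-- accident of the scan order.
def Pre_uscore (data : List (List Int)) : Prop :=
  ∀ r ∈ data, ∀ s ∈ data, r.length = s.length
instance (data : List (List Int)) : Decidable (Pre_uscore data) := by unfold Pre_uscore; infer_instance

def pvWitness_uscore : List (List Int) := [[1, 2], [3, 4], [2, 1]]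

def Spec_uscore (data : List (List Int)) (out : List Int) : Prop := out = uscore_alt data
instance (data : List (List Int)) (out : List Int) : Decidable (Spec_uscore data out) := by unfold Spec_uscore; infer_instance

-- ===== CLAIM (what is proved, stated in full; the proofs are below) =====
def Claim_equal_uscore : Prop := ∀ (data : List (List Int)), Dom_uscore data → Pre_uscore data → Spec_uscore data (uscore data)

-- ===== LEMMAS AND PROOFS =====

-- componentwise "x ≥ y" / "x ≤ y" over the zipped rows
def geB (x y : List Int) : Bool := (x.zip y).all (fun ab => !(ab.1 < ab.2))
def leB (x y : List Int) : Bool := (x.zip y).all (fun ab => !(ab.2 < ab.1))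

-- B's score of row r against the rows ts
def scoreIn (ts : List (List Int)) (r : List Int) : Int := (ts.map (fun s => cmpRows r s)).sum

theorem cmpLoop_eq (out : Bool → Bool → Int) (h0 : out false false = 0) :
    ∀ (l : List (Int × Int)) (ge le : Bool),
      (match cmpRowsLoop l ge le with
       | none => 0
       | some p => out p.1 p.2)
      = out (ge && l.all (fun ab => !(ab.1 < ab.2))) (le && l.all (fun ab => !(ab.2 < ab.1))) := by
  intro l
  induction l with
  | nil => intro ge le; simp [cmpRowsLoop]
  | cons ab l ih =>
    intro ge le
    rw [cmpRowsLoop]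
    simp only [List.all_cons]
    by_cases h1 : ab.1 < ab.2
    · have h2 : ¬ ab.2 < ab.1 := by omega
      rw [if_pos h1, if_pos h1]
      cases le with
      | false => simp [h1, h0]
      | true =>
        rw [if_neg (by simp)]
        simpa [h1, h2] using ih false true
    · by_cases h2 : ab.2 < ab.1
      · rw [if_neg h1, if_neg h1, if_pos h2]
        cases ge with
        | false => simp [h1, h2, h0]
        | true =>
          rw [if_neg (by simp)]
          simpa [h1, h2] using ih true false
      · rw [if_neg h1, if_neg h1, if_neg h2]
        by_cases hgl : ge = false ∧ le = false
        · obtain ⟨hg, hl⟩ := hgl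
          subst hg; subst hl
          simp [h1, h2, h0]
        · rw [if_neg (by revert hgl; cases ge <;> cases le <;> simp)]
          simpa [h1, h2] using ih ge le

theorem cmpRows_eq (x y : List Int) :
    cmpRows x y = if geB x y && !leB x y then 1 else if leB x y && !geB x y then -1 else 0 := by
  unfold cmpRows
  rw [cmpLoop_eq (fun g l' => if g && !l' then 1 else if l' && !g then -1 else 0) rfl (x.zip y) true true]
  simp only [Bool.true_and, geB, leB]
  rfl

theorem zip_all_swap (p : Int × Int → Bool) : ∀ (x y : List Int),
    (y.zip x).all p = (x.zip y).all (fun ab => p (ab.2, ab.1)) := by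
  intro x
  induction x with
  | nil => intro y; cases y <;> simp
  | cons a x ih =>
    intro y
    cases y with
    | nil => simp
    | cons b y => simp [ih]

theorem geB_swap (x y : List Int) : geB y x = leB x y := by
  unfold geB leB
  rw [zip_all_swap]

theorem leB_swap (x y : List Int) : leB y x = geB x y := by
  unfold geB leB
  rw [zip_all_swap]

theorem cmpRows_antisymm (x y : List Int) : cmpRows y x = -cmpRows x y := by
  rw [cmpRows_eq, cmpRows_eq, geB_swap x y, leB_swap x y]
  cases h1 : geB x y <;> cases h2 : leB x y <;> simp [h1, h2]

theorem cmpRows_self (x : List Int) : cmpRows x x = 0 := by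
  rw [cmpRows_eq]
  have h : geB x x = leB x x := geB_swap x x
  rw [h]
  cases leB x x <;> simp

theorem testSupLoop_shift (d1 d2 : List Int) (a b : Int) :
    ∀ k i gt, d2.length - i ≤ k →
      testSupLoop (a :: d1) (b :: d2) (i + 1) gt = testSupLoop d1 d2 i gt := by
  intro k
  induction k with
  | zero =>
    intro i gt h
    rw [testSupLoop, testSupLoop]
    have h2 : ¬ i < d2.length := by omega
    have h1 : ¬ i + 1 < (b :: d2).length := by simp; omega
    simp [h2, h1]
  | succ k ih =>
    intro i gt h
    rw [testSupLoop, testSupLoop]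
    by_cases hi : i < d2.length
    · have hi1 : i + 1 < (b :: d2).length := by simp; omega
      simp only [hi, hi1, dif_pos]
      have hg : PySem.List.pyGet? (a :: d1) ((i + 1 : Nat) : Int) = PySem.List.pyGet? d1 ((i : Nat) : Int) := by
        simp
      rw [hg]
      cases hgv : PySem.List.pyGet? d1 ((i : Nat) : Int) with
      | none => rfl
      | some av =>
        simp only [List.getElem_cons_succ]
        by_cases hba : d2[i]'hi < av
        · simp [hba]
        · simp only [hba, if_false]
          exact ih (i + 1) _ (by omega)
    · have hi1 : ¬ i + 1 < (b :: d2).length := by simp; omega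
      simp [hi, hi1]

def gtCnt (l : List (Int × Int)) : Int := (l.countP (fun ab => ab.1 < ab.2) : Nat)

theorem testSupLoop_char : ∀ (d1 d2 : List Int), d1.length = d2.length → ∀ gt : Int,
    testSupLoop d1 d2 0 gt
      = ((d1.zip d2).all (fun ab => !(ab.2 < ab.1)) && decide (gt + gtCnt (d1.zip d2) > 0)) := by
  intro d1
  induction d1 with
  | nil =>
    intro d2 h gt
    cases d2 with
    | nil => rw [testSupLoop]; simp [gtCnt]
    | cons b d2 => simp at h
  | cons a d1 ih =>
    intro d2 h gt
    cases d2 with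
    | nil => simp at h
    | cons b d2 =>
      rw [testSupLoop]
      have h0 : (0 : Nat) < (b :: d2).length := by simp
      simp only [h0, dif_pos]
      have hg : PySem.List.pyGet? (a :: d1) ((0 : Nat) : Int) = some a := by simp
      rw [hg]
      simp only [List.getElem_cons_zero]
      by_cases hba : b < a
      · simp [hba]
      · simp only [hba, if_false]
        rw [testSupLoop_shift d1 d2 a b d2.length 0 _ (by omega)]
        rw [ih d2 (by simpa using h) _]
        have hcnt : gtCnt ((a, b) :: d1.zip d2)
            = (if a < b then 1 else 0) + gtCnt (d1.zip d2) := by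
          simp only [gtCnt, List.countP_cons]
          by_cases hab : a < b <;> simp [hab] <;> push_cast <;> ring
        simp only [List.zip_cons_cons, List.all_cons, hcnt]
        have hnb : (!decide (b < a)) = true := by simp [hba]
        rw [hnb, Bool.true_and]
        congr 1
        rw [decide_eq_decide]
        by_cases hab : a < b <;> simp only [hab, if_pos, if_false] <;> omega

theorem zip_self_all_not_lt (x : List Int) :
    (x.zip x).all (fun ab => !(ab.1 < ab.2)) = true := by
  induction x with
  | nil => simp
  | cons a x ih => simp [ih]

theorem testSup_char (d1 d2 : List Int) (h : d1.length = d2.length) :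
    testSup d1 d2
      = ((d1.zip d2).all (fun ab => !(ab.2 < ab.1)) && !((d1.zip d2).all (fun ab => !(ab.1 < ab.2)))) := by
  have hcnt : decide ((0 : Int) + gtCnt (d1.zip d2) > 0)
      = !((d1.zip d2).all (fun ab => !(ab.1 < ab.2))) := by
    have h1 : ((d1.zip d2).countP (fun ab => decide (ab.1 < ab.2)) = 0)
        ↔ (d1.zip d2).all (fun ab => !(ab.1 < ab.2)) = true := by
      rw [List.countP_eq_zero, List.all_eq_true]
      constructor
      · intro hz ab hab; simpa using hz ab hab
      · intro hz ab hab; simpa using hz ab hab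
    cases hall : (d1.zip d2).all (fun ab => !(ab.1 < ab.2))
    · have h2 : (d1.zip d2).countP (fun ab => decide (ab.1 < ab.2)) ≠ 0 := by
        intro h0
        rw [hall] at h1
        simpa using h1.mp h0
      simp only [gtCnt, Bool.not_false, decide_eq_true_eq]
      omega
    · have h2 : (d1.zip d2).countP (fun ab => decide (ab.1 < ab.2)) = 0 := h1.mpr hall
      simp [gtCnt, h2]
  unfold testSup
  by_cases heq : d2 = d1
  · subst heq
    simp [zip_self_all_not_lt d2]
  · rw [if_neg (by simpa using heq)]
    rw [testSupLoop_char d1 d2 h 0, hcnt]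

theorem indicator_eq_cmp (r s : List Int) (h : r.length = s.length) :
    indicatorA r s = cmpRows r s := by
  unfold indicatorA
  rw [cmpRows_eq]
  rw [testSup_char s r h.symm, testSup_char r s h]
  rw [zip_all_swap (fun ab => !(ab.2 < ab.1)) r s, zip_all_swap (fun ab => !(ab.1 < ab.2)) r s]
  rfl

theorem foldl_append_map {α β : Type} (f : α → β) : ∀ (l : List α) (init : List β),
    l.foldl (fun acc x => acc ++ [f x]) init = init ++ l.map f := by
  intro l
  induction l with
  | nil => intro init; simp
  | cons x l ih => intro init; simp [ih]

theorem uscore_eq_map (data : List (List Int)) :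
    uscore data = data.map (fun r => (data.map (fun s => indicatorA r s)).sum) := by
  unfold uscore
  rw [show (fun (res : List Int) (row : List Int) =>
        res ++ [(data.foldl (fun scores row2 => scores ++ [indicatorA row row2]) []).sum])
      = (fun res row => res ++ [(fun r => (data.map (fun s => indicatorA r s)).sum) row]) by
    funext res row
    rw [foldl_append_map (fun row2 => indicatorA row row2) data []]
    simp]
  rw [foldl_append_map _ data []]
  simp

theorem innerFold (row : List Int) (f : List Int → Int) :
    ∀ (ts : List (List Int)) (acc : Int) (accL : List Int),
      ((ts.map f).zip ts).foldl (fun (acc : Int × List Int) p =>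
          (acc.1 + cmpRows row p.2, acc.2 ++ [p.1 - cmpRows row p.2])) (acc, accL)
      = (acc + (ts.map (fun t => cmpRows row t)).sum,
         accL ++ ts.map (fun t => f t - cmpRows row t)) := by
  intro ts
  induction ts with
  | nil => intro acc accL; simp
  | cons t ts ih =>
    intro acc accL
    simp only [List.map_cons, List.zip_cons_cons, List.foldl_cons, ih, List.sum_cons]
    rw [Prod.mk.injEq]
    constructor
    · ring
    · simp

theorem altInv : ∀ (l ts : List (List Int)),
    l.foldl (fun (st : List Int × List (List Int)) row =>
      let z := (st.1.zip st.2).foldl (fun (acc : Int × List Int) p =>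
        let c := cmpRows row p.2
        (acc.1 + c, acc.2 ++ [p.1 - c])) (0, ([] : List Int))
      (z.1 :: z.2, row :: st.2)) (ts.map (scoreIn ts), ts)
    = ((l.reverse ++ ts).map (scoreIn (l.reverse ++ ts)), l.reverse ++ ts) := by
  intro l
  induction l with
  | nil => intro ts; simp
  | cons row l ih =>
    intro ts
    rw [List.foldl_cons]
    have hz := innerFold row (scoreIn ts) ts 0 []
    simp only []
    rw [hz]
    have h1 : (0 : Int) + (ts.map (fun t => cmpRows row t)).sum = scoreIn (row :: ts) row := by
      simp [scoreIn, cmpRows_self]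
    have h2 : ([] : List Int) ++ ts.map (fun t => scoreIn ts t - cmpRows row t)
        = ts.map (scoreIn (row :: ts)) := by
      simp only [List.nil_append]
      apply List.map_congr_left
      intro t _
      simp [scoreIn, cmpRows_antisymm row t]
      ring
    rw [h1, h2]
    have h3 := ih (row :: ts)
    simp only [List.map_cons] at h3
    rw [h3]
    simp

theorem uscore_alt_eq_map (data : List (List Int)) :
    uscore_alt data = data.map (scoreIn data) := by
  unfold uscore_alt
  rw [show (([] : List Int), ([] : List (List Int)))
      = (([] : List (List Int)).map (scoreIn []), ([] : List (List Int))) by simp]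
  rw [altInv data.reverse []]
  simp

-- ===== VERDICT (by name: the statement is the Claim_ definition above) =====
theorem uscore_spec : Claim_equal_uscore := by
  intro data _ pre
  unfold Spec_uscore
  rw [uscore_eq_map, uscore_alt_eq_map]
  apply List.map_congr_left
  intro r hr
  unfold scoreIn
  congr 1
  apply List.map_congr_left
  intro s hs
  exact indicator_eq_cmp r s (pre r hr s hs)
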